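-- pv_equiv track=rewrite | github.com/musicx/TellMe | src/tellme/indexes.py | _first_sentence_from_nodes
-- ===== SOURCE A (Python) =====
-- def _first_sentence_from_nodes(nodes: list[dict]) -> str:
--     """Extract the first meaningful sentence from the richest node in the list."""
--     for node in sorted(nodes, key=lambda n: -len(str(n.get("content", "")))):
--         content = str(node.get("content", "")).strip()
--         if content:
--             first_line = content.split("\n")[0].strip()
--             if len(first_line) > 10:
--                 return first_line
--         summary = str(node.get("summary", "")).strip()
--         if summary:
--             return summary
--     return ""
-- ===== SOURCE B (Python) =====
-- def _candidate(node):
--     """The line this node would contribute, or None."""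
--     first_line = str(node.get("content", "")).strip().split("\n")[0].strip()
--     if len(first_line) > 10:
--         return first_line
--     return str(node.get("summary", "")).strip() or None
--
--
-- def _first_sentence_from_nodes(nodes: list[dict]) -> str:
--     """Extract the first meaningful sentence from the richest node in the list."""
--     best_len = -1
--     best = ""
--     for node in nodes:
--         clen = len(str(node.get("content", "")))
--         if clen > best_len:
--             res = _candidate(node)
--             if res is not None:
--                 best_len = clen
--                 best = res
--     return best
-- ===== Notes on version B (the rewrite author's own statement) =====
-- stated objective: alternative
-- what changed: Replaces sort-by-descending-content-length-then-scan-for-the-first-match with a single unsorted pass that tracks the best matching node (strict '>' on the unstripped content length reproduces the stable sort's earliest-on-ties choice); it avoids the sort but per-node string work dominates, so measured cost is the same.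
import Mathlib
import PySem

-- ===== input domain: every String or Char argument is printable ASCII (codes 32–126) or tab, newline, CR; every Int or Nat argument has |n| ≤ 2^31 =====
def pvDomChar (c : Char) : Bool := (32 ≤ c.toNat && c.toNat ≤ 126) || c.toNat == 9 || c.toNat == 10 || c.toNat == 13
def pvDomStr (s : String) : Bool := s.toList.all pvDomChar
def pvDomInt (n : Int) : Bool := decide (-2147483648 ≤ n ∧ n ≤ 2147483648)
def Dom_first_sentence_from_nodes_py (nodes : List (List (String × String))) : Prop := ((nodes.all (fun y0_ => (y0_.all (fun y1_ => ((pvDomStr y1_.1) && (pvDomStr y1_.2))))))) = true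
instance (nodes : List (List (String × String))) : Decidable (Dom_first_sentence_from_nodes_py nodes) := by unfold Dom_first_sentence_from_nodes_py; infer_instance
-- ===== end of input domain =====

-- B replaces A's stable sort by descending content length + first-match scan with a single
-- pass tracking the best matching node (strict '>' on unstripped content length) instead of sorting.

-- node.get(key, "") on the association-list dict (first match, default "")
def nodeGet (node : List (String × String)) (k : String) : String :=
  match node.find? (fun p => p.1 == k) with
  | some p => p.2
  | none => ""

-- len(str(node.get("content", "")))
def contentLen (node : List (String × String)) : Int :=
  PySem.Str.len (nodeGet node "content")

-- ===== PORT A =====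
-- the for-loop body of A, with Python's early returns modelled by the nested structure
def scanA : List (List (String × String)) → String
  | [] => ""
  | node :: rest =>
    let content := PySem.Str.strip (nodeGet node "content")
    let fromContent : Option String :=
      if content ≠ "" then
        let first_line := PySem.Str.strip (PySem.List.pyGetD ((PySem.Str.split? content "\n").getD []) 0 "")
        if PySem.Str.len first_line > 10 then some first_line else none
      else none
    match fromContent with
    | some s => s
    | none =>
      let summary := PySem.Str.strip (nodeGet node "summary")
      if summary ≠ "" then summary else scanA rest

def first_sentence_from_nodes_py (nodes : List (List (String × String))) : String :=
  scanA (PySem.List.sorted nodes (fun n => -(contentLen n)) false)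

-- ===== PORT B =====
-- _candidate(node) from Source B
def candB (node : List (String × String)) : Option String :=
  let first_line := PySem.Str.strip (PySem.List.pyGetD ((PySem.Str.split? (PySem.Str.strip (nodeGet node "content")) "\n").getD []) 0 "")
  if PySem.Str.len first_line > 10 then some first_line
  else
    let summary := PySem.Str.strip (nodeGet node "summary")
    if summary ≠ "" then some summary else none

-- one iteration of Source B's loop over (best_len, best)
def stepB (acc : Int × String) (node : List (String × String)) : Int × String :=
  if contentLen node > acc.1 then
    match candB node with
    | some res => (contentLen node, res)
    | none => acc
  else acc

def first_sentence_from_nodes_py_alt (nodes : List (List (String × String))) : String :=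
  (nodes.foldl stepB (-1, "")).2

-- ===== PRECONDITION & SPEC =====
def Spec_first_sentence_from_nodes_py (nodes : List (List (String × String))) (out : String) : Prop := out = first_sentence_from_nodes_py_alt nodes
instance (nodes : List (List (String × String))) (out : String) : Decidable (Spec_first_sentence_from_nodes_py nodes out) := by unfold Spec_first_sentence_from_nodes_py; infer_instance

-- ===== CLAIM (what is proved, stated in full; the proofs are below) =====
def Claim_equal_first_sentence_from_nodes_py : Prop := ∀ (nodes : List (List (String × String))), Dom_first_sentence_from_nodes_py nodes → Spec_first_sentence_from_nodes_py nodes (first_sentence_from_nodes_py nodes)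

-- ===== LEMMAS AND PROOFS =====

theorem contentLen_nonneg (node : List (String × String)) : 0 ≤ contentLen node := by
  simp [contentLen, PySem.Str.len_eq]

-- the first node of a list contributing a candidate, paired with its content length
def firstMatch : List (List (String × String)) → Option (Int × String)
  | [] => none
  | n :: t => (candB n).elim (firstMatch t) (fun c => some (contentLen n, c))

-- one step of B's selection, on an optional accumulator
def combine (o : Option (Int × String)) (n : List (String × String)) : Option (Int × String) :=
  (candB n).elim o
    (fun c => o.elim (some (contentLen n, c))
      (fun p => if contentLen n > p.1 then some (contentLen n, c) else some p))

theorem scanA_cons (n : List (String × String)) (t : List (List (String × String))) :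
    scanA (n :: t) = ((candB n).elim (scanA t) (fun c => c)) := by
  simp only [scanA, candB]
  by_cases hC : PySem.Str.strip (nodeGet n "content") = ""
  · rw [hC]
    simp only [ne_eq, not_true_eq_false, if_false]
    have h10 : ¬ PySem.Str.len (PySem.Str.strip (PySem.List.pyGetD ((PySem.Str.split? "" "\n").getD []) 0 "")) > 10 := by decide
    simp only [h10, if_false]
    split <;> rfl
  · rw [if_pos hC]
    by_cases h10 : PySem.Str.len (PySem.Str.strip (PySem.List.pyGetD ((PySem.Str.split? (PySem.Str.strip (nodeGet n "content")) "\n").getD []) 0 "")) > 10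
    · simp only [h10, if_true]
      rfl
    · simp only [h10, if_false]
      split <;> rfl

theorem scanA_eq (s : List (List (String × String))) :
    scanA s = (firstMatch s).elim "" (fun p => p.2) := by
  induction s with
  | nil => rw [scanA, firstMatch]; rfl
  | cons n t ih =>
    rw [scanA_cons, firstMatch]
    cases candB n with
    | none => simpa using ih
    | some c => rfl

theorem firstMatch_mem {s : List (List (String × String))} {m : Int} {r : String}
    (h : firstMatch s = some (m, r)) : ∃ n ∈ s, m = contentLen n := by
  induction s with
  | nil => rw [firstMatch] at h; exact absurd h (by simp)
  | cons x t ih =>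
    rw [firstMatch] at h
    cases hc : candB x with
    | some c =>
      rw [hc] at h
      simp only [Option.elim_some, Option.some.injEq, Prod.mk.injEq] at h
      exact ⟨x, by simp, h.1.symm⟩
    | none =>
      rw [hc] at h
      simp only [Option.elim_none] at h
      obtain ⟨n, hn, hm⟩ := ih h
      exact ⟨n, by simp [hn], hm⟩

theorem firstMatch_insertBy (x : List (String × String)) (s : List (List (String × String)))
    (hs : s.Pairwise (fun a b => -(contentLen a) ≤ -(contentLen b))) :
    firstMatch (PySem.List.insertBy (fun a b => decide (-(contentLen a) < -(contentLen b))) x s)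
      = combine (firstMatch s) x := by
  induction s with
  | nil =>
    simp only [PySem.List.insertBy, firstMatch, combine]
    cases candB x <;> rfl
  | cons y ys ih =>
    rw [List.pairwise_cons] at hs
    obtain ⟨hy, hys⟩ := hs
    by_cases hlt : -(contentLen x) < -(contentLen y)
    · have hb : (decide (-(contentLen x) < -(contentLen y))) = true := decide_eq_true hlt
      simp only [PySem.List.insertBy, hb, if_true]
      rw [firstMatch]
      cases hcx : candB x with
      | none => simp [combine, hcx]
      | some c =>
        cases hfm : firstMatch (y :: ys) with
        | none => simp [combine, hcx]
        | some p =>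
          obtain ⟨m, r⟩ := p
          obtain ⟨n, hn, hm⟩ := firstMatch_mem hfm
          have hle : -(contentLen y) ≤ -(contentLen n) := by
            rcases List.mem_cons.mp hn with h | h
            · subst h; omega
            · exact hy n h
          have hgt : contentLen x > m := by omega
          simp [combine, hcx, hgt]
    · have hb : (decide (-(contentLen x) < -(contentLen y))) = false := decide_eq_false hlt
      simp only [PySem.List.insertBy, hb, Bool.false_eq_true, if_false]
      rw [firstMatch]
      cases hcy : candB y with
      | some c =>
        rw [firstMatch, hcy]
        cases hcx : candB x with
        | none => simp [combine, hcx]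
        | some cx =>
          have hng : ¬ contentLen x > contentLen y := by omega
          simp [combine, hcx, hng]
      | none =>
        rw [firstMatch, hcy]
        simp only [Option.elim_none]
        exact ih hys

-- the foldl form of PySem.List.sorted with reverse = false
theorem sorted_eq_foldl {α κ : Type} [LT κ] [DecidableLT κ] (xs : List α) (key : α → κ) :
    PySem.List.sorted xs key false
      = xs.foldl (fun acc x => PySem.List.insertBy (fun a b => decide (key a < key b)) x acc) [] := by
  simp [PySem.List.sorted]

theorem firstMatch_sortfold (l : List (List (String × String))) :
    firstMatch (l.foldl (fun acc x => PySem.List.insertBy (fun a b => decide (-(contentLen a) < -(contentLen b))) x acc) [])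
      = l.foldl combine none := by
  induction l using List.reverseRecOn with
  | nil => rw [List.foldl_nil, List.foldl_nil, firstMatch]
  | append_singleton t x ih =>
    simp only [List.foldl_append, List.foldl_cons, List.foldl_nil]
    rw [← ih]
    apply firstMatch_insertBy
    have := PySem.List.sorted_pairwise (xs := t) (key := fun n => -(contentLen n))
    rwa [sorted_eq_foldl] at this

theorem foldl_stepB_some (l : List (List (String × String))) :
    ∀ (m : Int) (r : String), 0 ≤ m →
      l.foldl combine (some (m, r)) = some (l.foldl stepB (m, r)) := by
  induction l with
  | nil => intro m r _; rfl
  | cons x t ih =>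
    intro m r hm
    simp only [List.foldl_cons]
    cases hc : candB x with
    | none =>
      simp only [combine, stepB, hc, Option.elim_none, ite_self]
      exact ih m r hm
    | some c =>
      by_cases h : contentLen x > m
      · simp only [combine, stepB, hc, Option.elim, h, if_true]
        exact ih _ _ (contentLen_nonneg x)
      · simp only [combine, stepB, hc, Option.elim, h, if_false]
        exact ih m r hm

theorem foldl_stepB_eq (l : List (List (String × String))) :
    l.foldl stepB (-1, "") = (l.foldl combine none).elim ((-1 : Int), "") (fun p => p) := by
  induction l with
  | nil => rfl
  | cons x t ih =>
    simp only [List.foldl_cons]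
    have h : contentLen x > -1 := by have := contentLen_nonneg x; omega
    cases hc : candB x with
    | none =>
      simp only [combine, stepB, hc, Option.elim_none, h, if_true]
      exact ih
    | some c =>
      simp only [combine, stepB, hc, Option.elim_some, Option.elim_none, h, if_true]
      rw [foldl_stepB_some t _ _ (contentLen_nonneg x)]
      rfl

-- ===== VERDICT (by name: the statement is the Claim_ definition above) =====
theorem first_sentence_from_nodes_py_spec : Claim_equal_first_sentence_from_nodes_py := by
  intro nodes _
  unfold Spec_first_sentence_from_nodes_py first_sentence_from_nodes_py first_sentence_from_nodes_py_alt
  rw [scanA_eq, sorted_eq_foldl, firstMatch_sortfold, foldl_stepB_eq]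
  cases nodes.foldl combine none with
  | none => rfl
  | some p => rfl
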